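-- pv_equiv track=rewrite | github.com/kamranrouhani/finanzpilot | backend/app/features/ai/service.py | _find_best_matching_category
-- ===== SOURCE A (Python) =====
-- def _find_best_matching_category(suggested: str, available: list[str]) -> str:
--     """Find best matching category using fuzzy matching.
--
--     Args:
--         suggested: AI-suggested category name
--         available: List of available categories
--
--     Returns:
--         Best matching category name
--     """
--     if not available:
--         return "Uncategorized"
--
--     suggested_lower = suggested.lower()
--
--     # Exact match (case-insensitive)
--     for cat in available:
--         if cat.lower() == suggested_lower:
--             return cat
--
--     # Substring match
--     for cat in available:
--         if suggested_lower in cat.lower() or cat.lower() in suggested_lower: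
--             return cat
--
--     # Word matching (for compound categories)
--     suggested_words = set(suggested_lower.split())
--     best_match = None
--     best_score = 0
--
--     for cat in available:
--         cat_words = set(cat.lower().split())
--         common_words = suggested_words & cat_words
--         if len(common_words) > best_score:
--             best_score = len(common_words)
--             best_match = cat
--
--     if best_match and best_score > 0:
--         return best_match
--
--     # Default to first category as last resort
--     return available[0]
-- ===== SOURCE B (Python) =====
-- def _find_best_matching_category(suggested: str, available: list[str]) -> str:
--     """Single-pass re-implementation: one scan maintains all three match tiers."""
--     if not available:
--         return "Uncategorized"
--
--     suggested_lower = suggested.lower()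
--     suggested_words = set(suggested_lower.split())
--
--     first_exact = None
--     first_substring = None
--     best_word = None
--     best_score = 0
--
--     for cat in available:
--         cat_lower = cat.lower()
--         if first_exact is None and cat_lower == suggested_lower:
--             first_exact = cat
--         if first_substring is None and (
--             suggested_lower in cat_lower or cat_lower in suggested_lower
--         ):
--             first_substring = cat
--         score = len(suggested_words & set(cat_lower.split()))
--         if score > best_score:
--             best_score = score
--             best_word = cat
--
--     if first_exact is not None:
--         return first_exact
--     if first_substring is not None:
--         return first_substring
--     if best_word is not None:
--         return best_word
--     return available[0]
-- ===== Notes on version B (the rewrite author's own statement) =====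
-- stated objective: alternative
-- what changed: Replaces A's three sequential scans of the list (exact, substring, word-overlap) by a single scan that maintains first-exact, first-substring and best-word-score accumulators and picks the highest tier afterwards.
import Mathlib
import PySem

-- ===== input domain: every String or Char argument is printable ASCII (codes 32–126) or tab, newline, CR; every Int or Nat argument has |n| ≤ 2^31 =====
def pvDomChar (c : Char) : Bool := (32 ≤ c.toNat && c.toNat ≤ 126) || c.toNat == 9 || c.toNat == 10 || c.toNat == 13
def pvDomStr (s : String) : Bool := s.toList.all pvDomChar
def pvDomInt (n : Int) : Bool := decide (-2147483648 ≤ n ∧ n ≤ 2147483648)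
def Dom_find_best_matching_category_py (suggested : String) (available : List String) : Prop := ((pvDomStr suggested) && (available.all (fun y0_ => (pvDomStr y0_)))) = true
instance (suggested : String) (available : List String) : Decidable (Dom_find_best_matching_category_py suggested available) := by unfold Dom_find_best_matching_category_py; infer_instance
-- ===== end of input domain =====

-- B replaces A's three sequential scans by a single scan maintaining the three match tiers (same cost, different decomposition).

-- ===== PORT A =====
-- first loop of A: exact case-insensitive match
def pvAExact (sl : String) : List String → Option String
  | [] => none
  | cat :: rest => if PySem.Str.lower cat = sl then some cat else pvAExact sl rest

-- second loop of A: substring match (either direction)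
def pvASub (sl : String) : List String → Option String
  | [] => none
  | cat :: rest =>
    if PySem.Str.isIn sl (PySem.Str.lower cat) || PySem.Str.isIn (PySem.Str.lower cat) sl
    then some cat else pvASub sl rest

-- third loop of A: best word-overlap accumulator (best_match, best_score)
def pvAWord (sw : PySem.Set String) : List String → Option String × Int → Option String × Int
  | [], acc => acc
  | cat :: rest, (bm, bs) =>
    let catWords := PySem.Set.ofList (PySem.Str.split₀ (PySem.Str.lower cat))
    let common := PySem.Set.inter sw catWords
    if PySem.Set.len common > bs then pvAWord sw rest (some cat, PySem.Set.len common)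
    else pvAWord sw rest (bm, bs)

def find_best_matching_category_py (suggested : String) (available : List String) : String :=
  match available with
  | [] => "Uncategorized"
  | a0 :: _ =>
    let sl := PySem.Str.lower suggested
    match pvAExact sl available with
    | some cat => cat
    | none =>
      match pvASub sl available with
      | some cat => cat
      | none =>
        let sw := PySem.Set.ofList (PySem.Str.split₀ sl)
        match pvAWord sw available (none, 0) with
        | (some bm, bs) => if bm ≠ "" ∧ 0 < bs then bm else a0   -- `if best_match and best_score > 0`
        | (none, _) => a0

-- ===== PORT B =====
-- B's single loop body: state = (first_exact, first_substring, best_word, best_score)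
def pvBStep (sl : String) (sw : PySem.Set String)
    (st : Option String × Option String × Option String × Int) (cat : String) :
    Option String × Option String × Option String × Int :=
  let cl := PySem.Str.lower cat
  let e := match st.1 with
    | none => if cl = sl then some cat else none
    | some x => some x
  let sub := match st.2.1 with
    | none => if PySem.Str.isIn sl cl || PySem.Str.isIn cl sl then some cat else none
    | some x => some x
  let score := PySem.Set.len (PySem.Set.inter sw (PySem.Set.ofList (PySem.Str.split₀ cl)))
  if score > st.2.2.2 then (e, sub, some cat, score) else (e, sub, st.2.2.1, st.2.2.2)

def find_best_matching_category_py_alt (suggested : String) (available : List String) : String :=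
  match available with
  | [] => "Uncategorized"
  | a0 :: _ =>
    let sl := PySem.Str.lower suggested
    let sw := PySem.Set.ofList (PySem.Str.split₀ sl)
    let st := available.foldl (pvBStep sl sw) (none, none, none, 0)
    match st.1 with
    | some c => c
    | none =>
      match st.2.1 with
      | some c => c
      | none =>
        match st.2.2.1 with
        | some c => c
        | none => a0

-- ===== PRECONDITION & SPEC =====
def Spec_find_best_matching_category_py (suggested : String) (available : List String) (out : String) : Prop := out = find_best_matching_category_py_alt suggested available
instance (suggested : String) (available : List String) (out : String) : Decidable (Spec_find_best_matching_category_py suggested available out) := by unfold Spec_find_best_matching_category_py; infer_instance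

-- ===== CLAIM (what is proved, stated in full; the proofs are below) =====
def Claim_equal_find_best_matching_category_py : Prop := ∀ (suggested : String) (available : List String), Dom_find_best_matching_category_py suggested available → Spec_find_best_matching_category_py suggested available (find_best_matching_category_py suggested available)

-- ===== LEMMAS AND PROOFS =====

-- exact/substring accumulators of B's loop, isolated
def pvExAcc (sl : String) : List String → Option String → Option String
  | [], e => e
  | cat :: rest, e =>
    pvExAcc sl rest (match e with
      | none => if PySem.Str.lower cat = sl then some cat else none
      | some x => some x)

def pvSubAcc (sl : String) : List String → Option String → Option String
  | [], s => s
  | cat :: rest, s =>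
    pvSubAcc sl rest (match s with
      | none => if PySem.Str.isIn sl (PySem.Str.lower cat) || PySem.Str.isIn (PySem.Str.lower cat) sl then some cat else none
      | some x => some x)

-- B's fold decomposes into the three independent accumulators
theorem foldl_pvBStep (sl : String) (sw : PySem.Set String) :
    ∀ (l : List String) (e s bm : Option String) (bs : Int),
      l.foldl (pvBStep sl sw) (e, s, bm, bs) =
        (pvExAcc sl l e, pvSubAcc sl l s, pvAWord sw l (bm, bs)) := by
  intro l
  induction l with
  | nil => intro e s bm bs; simp [pvExAcc, pvSubAcc, pvAWord]
  | cons cat rest ih =>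
    intro e s bm bs
    simp only [List.foldl_cons, pvBStep, pvExAcc, pvSubAcc, pvAWord]
    split <;> simp [ih]

theorem pvExAcc_some (sl : String) : ∀ (l : List String) (x : String), pvExAcc sl l (some x) = some x := by
  intro l; induction l with
  | nil => intro x; rfl
  | cons c r ih => intro x; simp [pvExAcc, ih]

theorem pvExAcc_none (sl : String) : ∀ (l : List String), pvExAcc sl l none = pvAExact sl l := by
  intro l; induction l with
  | nil => rfl
  | cons c r ih =>
    simp only [pvExAcc, pvAExact]
    split <;> simp [ih, pvExAcc_some]

theorem pvSubAcc_some (sl : String) : ∀ (l : List String) (x : String), pvSubAcc sl l (some x) = some x := by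
  intro l; induction l with
  | nil => intro x; rfl
  | cons c r ih => intro x; simp [pvSubAcc, ih]

theorem pvSubAcc_none (sl : String) : ∀ (l : List String), pvSubAcc sl l none = pvASub sl l := by
  intro l; induction l with
  | nil => rfl
  | cons c r ih =>
    simp only [pvSubAcc, pvASub]
    split <;> simp [ih, pvSubAcc_some]

-- invariant of the word accumulator: a recorded best match has positive score and a nonempty word list
def pvWordInv (p : Option String × Int) : Prop :=
  (p.1 = none ∧ p.2 = 0) ∨ (∃ c, p.1 = some c ∧ 0 < p.2 ∧ PySem.Str.split₀ (PySem.Str.lower c) ≠ [])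

theorem pvAWord_inv (sw : PySem.Set String) :
    ∀ (l : List String) (p : Option String × Int), pvWordInv p → pvWordInv (pvAWord sw l p) := by
  intro l
  induction l with
  | nil => intro p h; simpa [pvAWord] using h
  | cons cat rest ih =>
    rintro ⟨bm, bs⟩ h
    simp only [pvAWord]
    split
    · rename_i hgt
      apply ih
      refine Or.inr ⟨cat, rfl, ?_, ?_⟩
      · -- score > bs and bs ≥ 0 by the invariant
        rcases h with ⟨_, h2⟩ | ⟨c, _, h2, _⟩ <;> simp only at h2 <;> omega
      · -- positive length of the intersection forces a word, hence a nonempty split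
        intro hnil
        have hpos : 0 < (PySem.Set.inter sw (PySem.Set.ofList (PySem.Str.split₀ (PySem.Str.lower cat)))).length := by
          have hbs : 0 ≤ bs := by
            rcases h with ⟨_, h2⟩ | ⟨c, _, h2, _⟩ <;> simp only at h2 <;> omega
          simp only [PySem.Set.len] at hgt
          omega
        obtain ⟨w, hw⟩ := List.exists_mem_of_length_pos hpos
        have := (PySem.Set.mem_inter sw (PySem.Set.ofList (PySem.Str.split₀ (PySem.Str.lower cat))) w).1 hw
        rcases this with ⟨_, hw2⟩
        rw [PySem.Set.mem_ofList] at hw2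
        rw [hnil] at hw2
        exact absurd hw2 (List.not_mem_nil)
    · exact ih _ h

-- ===== VERDICT (by name: the statement is the Claim_ definition above) =====
theorem find_best_matching_category_py_spec : Claim_equal_find_best_matching_category_py := by
  intro suggested available _
  unfold Spec_find_best_matching_category_py
  cases available with
  | nil => rfl
  | cons a0 rest =>
    simp only [find_best_matching_category_py, find_best_matching_category_py_alt,
      foldl_pvBStep, pvExAcc_none, pvSubAcc_none]
    cases hex : pvAExact (PySem.Str.lower suggested) (a0 :: rest) with
    | some c => rfl
    | none =>
      cases hsub : pvASub (PySem.Str.lower suggested) (a0 :: rest) with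
      | some c => rfl
      | none =>
        have hinv := pvAWord_inv (PySem.Set.ofList (PySem.Str.split₀ (PySem.Str.lower suggested)))
          (a0 :: rest) (none, 0) (Or.inl ⟨rfl, rfl⟩)
        cases hw : pvAWord (PySem.Set.ofList (PySem.Str.split₀ (PySem.Str.lower suggested))) (a0 :: rest) (none, 0) with
        | mk bm bs =>
          rw [hw] at hinv
          rcases hinv with ⟨h1, h2⟩ | ⟨c, h1, h2, h3⟩
          · simp only at h1 h2; subst h1; rfl
          · simp only at h1 h2 h3
            subst h1
            have hc : c ≠ "" := by
              intro hce; subst hce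
              exact h3 (by decide)
            simp [hc, h2]
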